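-- pv_equiv track=rewrite | github.com/Putumani/Python_Fundamental_Projects | Twenty_Twenty/4.Combining_Instructions/Calling_Functions/Recursion/submission_004-problem-master/super_algos.py | find_possible_strings
-- ===== SOURCE A (Python) =====
-- def find_possible_strings(character_set, n):
--     """ In this function we return a list of all possible strings of length n from the provided character_set"""
--     character = []
--     for i in character_set:
--
--         if isinstance(i,int) == True:
--             return []
--
--     if n == 1:
--
--         return character_set
--
--     if n > 0:
--         for i in character_set:
--             for char in find_possible_strings(character_set, n-1):
--                 character.append(i + char)
--
--     return character
-- ===== SOURCE B (Python) =====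
-- def find_possible_strings(character_set, n):
--     """Iterative bottom-up version: builds each level of strings exactly once."""
--     if n < 1:
--         return []
--     result = character_set
--     for _ in range(n - 1):
--         if not result:
--             return []
--         result = [c + s for c in character_set for s in result]
--     return result
-- ===== Notes on version B (the rewrite author's own statement) =====
-- stated objective: alternative
-- what changed: Replaces the top-down recursion (which recomputes the length-(n-1) list once per character at every level) by a bottom-up iteration that builds each level exactly once, with an early return when the running level is empty.
import Mathlib
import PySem

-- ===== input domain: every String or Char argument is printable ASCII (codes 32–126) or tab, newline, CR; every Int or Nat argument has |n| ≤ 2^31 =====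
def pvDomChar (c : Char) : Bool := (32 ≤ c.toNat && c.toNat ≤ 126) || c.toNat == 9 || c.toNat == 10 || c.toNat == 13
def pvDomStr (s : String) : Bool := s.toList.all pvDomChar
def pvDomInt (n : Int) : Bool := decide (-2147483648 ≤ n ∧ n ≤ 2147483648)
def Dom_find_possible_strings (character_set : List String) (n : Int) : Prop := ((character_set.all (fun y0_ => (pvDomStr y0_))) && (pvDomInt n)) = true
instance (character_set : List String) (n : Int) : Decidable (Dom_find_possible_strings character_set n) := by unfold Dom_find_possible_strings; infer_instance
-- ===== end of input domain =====

-- B replaces A's top-down recursion (which recomputes the length-(n-1) level once per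
-- character at every level) by a bottom-up iteration building each level exactly once.

-- ===== PORT A =====
-- The 'isinstance(i, int)' guard of A is vacuous here: every element is a String.
def find_possible_strings (character_set : List String) (n : Int) : List String :=
  if n = 1 then character_set
  else if _h : n > 0 then
    character_set.foldl
      (fun acc i =>
        (find_possible_strings character_set (n - 1)).foldl
          (fun acc2 ch => acc2 ++ [i ++ ch]) acc) []
  else []
termination_by n.toNat
decreasing_by omega

-- ===== PORT B =====
-- the list comprehension [c + s for c in character_set for s in result]
def fps_step (character_set : List String) (result : List String) : List String :=
  character_set.flatMap (fun c => result.map (fun s => c ++ s))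

-- the 'for _ in range(n-1)' loop with its early return on an empty level
def fps_iter (character_set : List String) : Nat → List String → List String
  | 0, result => result
  | k + 1, result =>
      if result = [] then []
      else fps_iter character_set k (fps_step character_set result)

def find_possible_strings_alt (character_set : List String) (n : Int) : List String :=
  if n < 1 then []
  else fps_iter character_set (n - 1).toNat character_set

-- ===== PRECONDITION & SPEC =====
-- Pre_ excludes nonempty character sets with n > 900: there A recurses to depth n and
-- raises RecursionError (Python's limit is 1000; the exact raising threshold depends on
-- interpreter stack state, so the bound sits just below it and excludes a thin band of
-- single-character inputs on which A still returns the same value B returns).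
def Pre_find_possible_strings (character_set : List String) (n : Int) : Prop :=
  character_set = [] ∨ n ≤ 900
instance (character_set : List String) (n : Int) : Decidable (Pre_find_possible_strings character_set n) := by unfold Pre_find_possible_strings; infer_instance
def pvWitness_find_possible_strings : List String × Int := (["a", "b"], 2)

def Spec_find_possible_strings (character_set : List String) (n : Int) (out : List String) : Prop := out = find_possible_strings_alt character_set n
instance (character_set : List String) (n : Int) (out : List String) : Decidable (Spec_find_possible_strings character_set n out) := by unfold Spec_find_possible_strings; infer_instance

-- ===== CLAIM (what is proved, stated in full; the proofs are below) =====
def Claim_equal_find_possible_strings : Prop := ∀ (character_set : List String) (n : Int), Dom_find_possible_strings character_set n → Pre_find_possible_strings character_set n → Spec_find_possible_strings character_set n (find_possible_strings character_set n)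

-- ===== LEMMAS AND PROOFS =====

theorem fps_step_nil (cs : List String) : fps_step cs [] = [] := by
  simp [fps_step]

theorem iterate_step_nil (cs : List String) (k : Nat) : (fps_step cs)^[k] [] = [] := by
  induction k with
  | zero => rfl
  | succ k ih => rw [Function.iterate_succ_apply, fps_step_nil, ih]

-- the early-exit loop equals plain iteration of the step
theorem fps_iter_eq_iterate (cs : List String) (k : Nat) (r : List String) :
    fps_iter cs k r = (fps_step cs)^[k] r := by
  induction k generalizing r with
  | zero => rfl
  | succ k ih =>
      rw [Function.iterate_succ_apply]
      by_cases h : r = []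
      · subst h
        rw [fps_step_nil, show fps_iter cs (k + 1) ([] : List String) = [] from by simp [fps_iter],
          iterate_step_nil]
      · simp [fps_iter, h, ih]

-- A's double append-loop is one application of fps_step
theorem findA_unfold (cs : List String) (n : Int) (h1 : n ≠ 1) (h0 : n > 0) :
    find_possible_strings cs n = fps_step cs (find_possible_strings cs (n - 1)) := by
  rw [find_possible_strings]
  simp only [h1, if_false, dif_pos h0]
  generalize find_possible_strings cs (n - 1) = X
  simp only [PySem.List.foldl_append_singleton_eq_map,
    PySem.List.foldl_append_eq_flatMap, List.nil_append, fps_step]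

theorem findA_eq_iterate (cs : List String) (k : Nat) (n : Int) (hn : n = (k : Int) + 1) :
    find_possible_strings cs n = (fps_step cs)^[k] cs := by
  induction k generalizing n with
  | zero =>
      subst hn
      simp [find_possible_strings]
  | succ k ih =>
      subst hn
      rw [findA_unfold cs _ (by omega) (by omega), Function.iterate_succ_apply']
      rw [show ((k + 1 : Nat) : Int) + 1 - 1 = (k : Int) + 1 by push_cast; ring, ih _ rfl]

theorem findA_nonpos (cs : List String) (n : Int) (h : n < 1) :
    find_possible_strings cs n = [] := by
  rw [find_possible_strings]
  rw [if_neg (by omega : ¬ n = 1), dif_neg (by omega : ¬ n > 0)]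

-- ===== VERDICT (by name: the statement is the Claim_ definition above) =====
theorem find_possible_strings_spec : Claim_equal_find_possible_strings := by
  intro cs n _ _
  unfold Spec_find_possible_strings find_possible_strings_alt
  by_cases h : n < 1
  · rw [if_pos h, findA_nonpos cs n h]
  · rw [if_neg h, fps_iter_eq_iterate]
    exact findA_eq_iterate cs (n - 1).toNat n (by omega)
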